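-- pv_equiv track=rewrite | github.com/Wolves-SoftWare/SpaceColony | src/SSG/Functions/RollingFunctions.py | determineClimate
-- ===== SOURCE A (Python) =====
-- def determineClimate(Cryosphere,Hydrosphere,Humidity):
--     Climate = {}
--     if   Cryosphere <= 30:  Cryosphere = "Low"
--     elif Cryosphere >= 70:  Cryosphere = "High"
--     else:                   Cryosphere = "Medium"
--     if   Hydrosphere <= 30: Hydrosphere = "Low"
--     elif Hydrosphere >= 70: Hydrosphere = "High"
--     else:                   Hydrosphere = "Medium"
--     if   Humidity <= 30:    Humidity = "Low"
--     elif Humidity >= 70:    Humidity = "High"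
--     else:                   Humidity = "Medium"
--
--     Climate["Hot Desertic"] =       ("Low","Low","Low")
--     Climate["Savannah"] =           ("Low","Medium","Medium")
--     Climate["Jungle"] =             ("Low","High","High")
--     Climate["Tropical"] =           ("Medium","Medium","Medium")
--     Climate["Cool RainForest"] =    ("Medium","High","High")
--     Climate["Cold Desertic"] =      ("High","Low","Low")
--     Climate["Artic"] =              ("High","Medium","Medium")
--
--     output = "Undetermined Climate"  # Climat par defaut
--     for currentClimate, value in Climate.items():
--         # Recupere un nouveau climat si le tuple correspond
--         if (Cryosphere, Hydrosphere, Humidity) == value: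
--             output = currentClimate
--
--     return output
-- ===== SOURCE B (Python) =====
-- # B: numeric band indices into a 3x3 grid, using the invariant that every
-- # named climate in A's table has equal Hydrosphere and Humidity bands.
-- _GRID = [
--     ["Hot Desertic", "Savannah", "Jungle"],
--     ["Undetermined Climate", "Tropical", "Cool RainForest"],
--     ["Cold Desertic", "Artic", "Undetermined Climate"],
-- ]
--
--
-- def _band(v):
--     return 0 if v <= 30 else (2 if v >= 70 else 1)
--
--
-- def determineClimate(Cryosphere, Hydrosphere, Humidity):
--     w = _band(Hydrosphere)
--     if w != _band(Humidity):
--         return "Undetermined Climate"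
--     return _GRID[_band(Cryosphere)][w]
-- ===== Notes on version B (the rewrite author's own statement) =====
-- stated objective: alternative
-- what changed: Drops the string labels and the name->tuple dict scan entirely: B computes numeric band indices 0/1/2, short-circuits to the default unless the Hydrosphere and Humidity bands coincide (an invariant of A's seven-entry table), and otherwise reads the answer from a 3x3 array indexed by (cryosphere band, water band).
import Mathlib
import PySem

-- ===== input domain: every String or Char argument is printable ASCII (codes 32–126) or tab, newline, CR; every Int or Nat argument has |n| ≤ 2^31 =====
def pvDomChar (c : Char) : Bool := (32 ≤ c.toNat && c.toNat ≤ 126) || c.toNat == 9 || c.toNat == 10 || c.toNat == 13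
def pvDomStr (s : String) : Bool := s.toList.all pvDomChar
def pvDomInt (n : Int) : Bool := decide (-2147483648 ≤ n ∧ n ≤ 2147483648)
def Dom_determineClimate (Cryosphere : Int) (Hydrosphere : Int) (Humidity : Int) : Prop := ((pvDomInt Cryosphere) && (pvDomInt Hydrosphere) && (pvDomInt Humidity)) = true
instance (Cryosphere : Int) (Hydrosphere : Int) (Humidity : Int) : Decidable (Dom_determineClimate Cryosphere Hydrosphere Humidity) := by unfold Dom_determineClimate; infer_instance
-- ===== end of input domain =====

-- B replaces A's label strings and dict scan by numeric band indices into a 3x3 grid, using the invariant that named climates need equal Hydrosphere/Humidity bands (alternative decomposition, same cost).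


-- ===== PORT A =====
def determineClimate (Cryosphere : Int) (Hydrosphere : Int) (Humidity : Int) : String :=
  let Cryosphere := if Cryosphere ≤ 30 then "Low" else if Cryosphere ≥ 70 then "High" else "Medium"
  let Hydrosphere := if Hydrosphere ≤ 30 then "Low" else if Hydrosphere ≥ 70 then "High" else "Medium"
  let Humidity := if Humidity ≤ 30 then "Low" else if Humidity ≥ 70 then "High" else "Medium"
  let Climate : PySem.Dict String (String × String × String) :=
    ((((((((PySem.Dict.empty).insert "Hot Desertic" ("Low","Low","Low")).insert
      "Savannah" ("Low","Medium","Medium")).insert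
      "Jungle" ("Low","High","High")).insert
      "Tropical" ("Medium","Medium","Medium")).insert
      "Cool RainForest" ("Medium","High","High")).insert
      "Cold Desertic" ("High","Low","Low")).insert
      "Artic" ("High","Medium","Medium"))
  Climate.items.foldl
    (fun output (kv : String × (String × String × String)) =>
      if (Cryosphere, Hydrosphere, Humidity) == kv.2 then kv.1 else output)
    "Undetermined Climate"

-- ===== PORT B =====
-- 3x3 grid of names indexed by (cryosphere band, water band)
def climateGrid : List (List String) :=
  [["Hot Desertic", "Savannah", "Jungle"],
   ["Undetermined Climate", "Tropical", "Cool RainForest"],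
   ["Cold Desertic", "Artic", "Undetermined Climate"]]

def bandOf (v : Int) : Int :=
  if v ≤ 30 then 0 else if v ≥ 70 then 2 else 1

def determineClimate_alt (Cryosphere : Int) (Hydrosphere : Int) (Humidity : Int) : String :=
  let w := bandOf Hydrosphere
  if w ≠ bandOf Humidity then "Undetermined Climate"
  else
    -- indices are always in range (bands are 0/1/2), so Python's [][] never raises;
    -- ported with pyGet? and an unreachable default
    (PySem.List.pyGet? ((PySem.List.pyGet? climateGrid (bandOf Cryosphere)).getD []) w).getD
      "Undetermined Climate"

-- ===== PRECONDITION & SPEC =====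
def Spec_determineClimate (Cryosphere : Int) (Hydrosphere : Int) (Humidity : Int) (out : String) : Prop := out = determineClimate_alt Cryosphere Hydrosphere Humidity
instance (Cryosphere : Int) (Hydrosphere : Int) (Humidity : Int) (out : String) : Decidable (Spec_determineClimate Cryosphere Hydrosphere Humidity out) := by unfold Spec_determineClimate; infer_instance

-- ===== CLAIM (what is proved, stated in full; the proofs are below) =====
def Claim_equal_determineClimate : Prop := ∀ (Cryosphere : Int) (Hydrosphere : Int) (Humidity : Int), Dom_determineClimate Cryosphere Hydrosphere Humidity → Spec_determineClimate Cryosphere Hydrosphere Humidity (determineClimate Cryosphere Hydrosphere Humidity)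

-- ===== LEMMAS AND PROOFS =====

-- ===== VERDICT (by name: the statement is the Claim_ definition above) =====
theorem determineClimate_spec : Claim_equal_determineClimate := by
  intro c h u _
  unfold Spec_determineClimate determineClimate determineClimate_alt bandOf
  split_ifs <;> decide
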